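-- pv_equiv track=rewrite | github.com/HugoAhoy/UNet-Pruning-on-Deblur | csgd/csgd/csgd_prune.py | get_preceding_from_succeding
-- ===== SOURCE A (Python) =====
-- def get_preceding_from_succeding(succeeding_map):
--     preceding_map = {}
--     for k, v in succeeding_map.items():
--         if type(v) is not list:
--             v = [v]
--         for i in v:
--             if i not in preceding_map:
--                 preceding_map[i] = [k]
--             else:
--                 preceding_map[i].append(k)
--     for k in preceding_map:
--         preceding_map[k].sort()
--     return preceding_map
-- ===== SOURCE B (Python) =====
-- def _insert_sorted(lst, x):
--     lo, hi = 0, len(lst)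
--     while lo < hi:
--         mid = (lo + hi) // 2
--         if x < lst[mid]:
--             hi = mid
--         else:
--             lo = mid + 1
--     lst.insert(lo, x)
--
-- def get_preceding_from_succeding(succeeding_map):
--     preceding_map = {}
--     for k, v in succeeding_map.items():
--         if type(v) is not list:
--             v = [v]
--         for i in v:
--             _insert_sorted(preceding_map.setdefault(i, []), k)
--     return preceding_map
-- ===== Notes on version B (the rewrite author's own statement) =====
-- stated objective: alternative
-- what changed: B builds each predecessor bucket already sorted in a single pass, inserting every key at its binary-searched position (helper _insert_sorted), instead of A's append-everything-then-sort-every-bucket-in-a-second-loop; the final per-bucket sort pass disappears.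
import Mathlib
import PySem

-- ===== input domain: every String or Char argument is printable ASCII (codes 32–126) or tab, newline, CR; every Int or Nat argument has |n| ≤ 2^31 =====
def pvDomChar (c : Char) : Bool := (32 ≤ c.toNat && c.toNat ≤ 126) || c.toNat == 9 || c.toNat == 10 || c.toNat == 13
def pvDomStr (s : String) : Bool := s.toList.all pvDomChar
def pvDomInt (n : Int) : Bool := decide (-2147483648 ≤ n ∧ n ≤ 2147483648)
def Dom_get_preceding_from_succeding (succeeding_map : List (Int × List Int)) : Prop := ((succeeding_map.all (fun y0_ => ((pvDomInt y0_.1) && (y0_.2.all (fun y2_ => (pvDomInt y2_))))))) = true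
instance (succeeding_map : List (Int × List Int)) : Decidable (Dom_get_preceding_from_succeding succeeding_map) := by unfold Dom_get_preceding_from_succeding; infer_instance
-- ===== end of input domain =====

-- B replaces A's append-then-sort-each-bucket-in-a-second-loop by a single pass that keeps
-- every bucket sorted via ordered insertion (objective: alternative decomposition, same cost class).
-- Under the type convention the dict values are always lists, so A's `type(v) is not list`
-- normalization branch never fires and is omitted from both ports.

-- ===== PORT A =====
def get_preceding_from_succeding (succeeding_map : List (Int × List Int)) : List (Int × List Int) :=
  let d := PySem.Dict.ofList succeeding_map
  let pm := d.items.foldl (fun pm kv =>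
    kv.2.foldl (fun pm i =>
      if pm.contains i = false then pm.insert i [kv.1]
      else pm.modify i [] (fun l => l ++ [kv.1])) pm) PySem.Dict.empty
  let pm2 := pm.keys.foldl (fun pm k => pm.modify k [] (fun l => PySem.List.sorted l (fun x => x))) pm
  pm2.items

-- ===== PORT B =====
-- port of Source B's _insert_sorted: binary search for the insertion point (the `while lo < hi` loop;
-- `lst.getD mid 0` is exact for Python's lst[mid] since lo < hi ≤ len keeps mid in range).
def bisectLoop (lst : List Int) (x : Int) (lo hi : Nat) : Nat :=
  if lo < hi then
    if x < lst.getD ((lo + hi) / 2) 0 then bisectLoop lst x lo ((lo + hi) / 2)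
    else bisectLoop lst x ((lo + hi) / 2 + 1) hi
  else lo
termination_by hi - lo
decreasing_by all_goals omega

-- lst.insert(lo, x) with 0 ≤ lo ≤ len inserts before index lo: exactly take lo ++ x :: drop lo
def insSorted (lst : List Int) (x : Int) : List Int :=
  let lo := bisectLoop lst x 0 lst.length
  lst.take lo ++ x :: lst.drop lo

-- `_insert_sorted(preceding_map.setdefault(i, []), k)` mutates the bucket stored at i in place;
-- storing back the inserted bucket with Dict.insert is exact (insert keeps an existing key's position,
-- and appends a fresh key exactly as setdefault does)
def get_preceding_from_succeding_alt (succeeding_map : List (Int × List Int)) : List (Int × List Int) :=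
  ((PySem.Dict.ofList succeeding_map).items.foldl (fun pm kv =>
    kv.2.foldl (fun pm i => pm.insert i (insSorted (pm.getD i []) kv.1)) pm)
    PySem.Dict.empty).items

-- ===== PRECONDITION & SPEC =====
def Spec_get_preceding_from_succeding (succeeding_map : List (Int × List Int)) (out : List (Int × List Int)) : Prop := out = get_preceding_from_succeding_alt succeeding_map
instance (succeeding_map : List (Int × List Int)) (out : List (Int × List Int)) : Decidable (Spec_get_preceding_from_succeding succeeding_map out) := by unfold Spec_get_preceding_from_succeding; infer_instance

-- ===== CLAIM (what is proved, stated in full; the proofs are below) =====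
def Claim_equal_get_preceding_from_succeding : Prop := ∀ (succeeding_map : List (Int × List Int)), Dom_get_preceding_from_succeding succeeding_map → Spec_get_preceding_from_succeding succeeding_map (get_preceding_from_succeding succeeding_map)

-- ===== LEMMAS AND PROOFS =====

theorem bisectLoop_spec (l : List Int) (x : Int) (hp : l.Pairwise (· ≤ ·)) :
    ∀ n lo hi, hi - lo = n → lo ≤ hi → hi ≤ l.length →
    (∀ j (hj : j < l.length), j < lo → l[j] ≤ x) →
    (∀ j (hj : j < l.length), hi ≤ j → x < l[j]) →
    (lo ≤ bisectLoop l x lo hi ∧ bisectLoop l x lo hi ≤ hi) ∧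
    (∀ j (hj : j < l.length), j < bisectLoop l x lo hi → l[j] ≤ x) ∧
    (∀ j (hj : j < l.length), bisectLoop l x lo hi ≤ j → x < l[j]) := by
  intro n
  induction n using Nat.strong_induction_on with
  | _ n ih =>
    intro lo hi hn hlh hhl h3 h4
    rw [bisectLoop]
    by_cases hlt : lo < hi
    · rw [if_pos hlt]
      have hmidlt : (lo + hi) / 2 < l.length := by omega
      have hgd : l.getD ((lo + hi) / 2) 0 = l[(lo + hi) / 2] :=
        List.getD_eq_getElem l 0 hmidlt
      by_cases hx : x < l.getD ((lo + hi) / 2) 0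
      · rw [if_pos hx]
        refine (ih ((lo + hi) / 2 - lo) (by omega) lo ((lo + hi) / 2) rfl (by omega) (by omega) h3 ?_).imp
          (fun h => ⟨h.1, by omega⟩) (fun h => h)
        intro j hj hmj
        rcases Nat.eq_or_lt_of_le hmj with rfl | hmj'
        · rw [← hgd]; exact hx
        · calc x < l[(lo + hi) / 2] := hgd ▸ hx
            _ ≤ l[j] := List.pairwise_iff_getElem.mp hp _ _ hmidlt hj hmj'
      · rw [if_neg hx]
        refine (ih (hi - ((lo + hi) / 2 + 1)) (by omega) ((lo + hi) / 2 + 1) hi rfl (by omega) hhl ?_ h4).imp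
          (fun h => ⟨by omega, h.2⟩) (fun h => h)
        intro j hj hmj
        rcases Nat.eq_or_lt_of_le (Nat.le_of_lt_succ hmj) with rfl | hmj'
        · rw [← hgd]; exact le_of_not_gt hx
        · calc l[j] ≤ l[(lo + hi) / 2] := List.pairwise_iff_getElem.mp hp _ _ hj hmidlt hmj'
            _ ≤ x := hgd ▸ le_of_not_gt hx
    · rw [if_neg hlt]
      have : lo = hi := by omega
      subst this
      exact ⟨⟨le_refl _, le_refl _⟩, h3, h4⟩

theorem insSorted_perm (lst : List Int) (x : Int) : (insSorted lst x).Perm (x :: lst) := by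
  unfold insSorted
  exact (List.perm_middle).trans (by rw [List.take_append_drop])

theorem insSorted_pairwise (lst : List Int) (x : Int)
    (h : lst.Pairwise (· ≤ ·)) : (insSorted lst x).Pairwise (· ≤ ·) := by
  obtain ⟨⟨-, hle⟩, hlo, hhi⟩ := bisectLoop_spec lst x h lst.length 0 lst.length rfl
    (Nat.zero_le _) (le_refl _) (fun j hj hc => absurd hc (Nat.not_lt_zero j))
    (fun j hj hc => absurd hj (by omega))
  unfold insSorted
  set p := bisectLoop lst x 0 lst.length with hpdef
  have hmem_take : ∀ a ∈ lst.take p, a ≤ x := by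
    intro a ha
    obtain ⟨j, hm, rfl⟩ := List.mem_take_iff_getElem.mp ha
    exact hlo j (by omega) (by omega)
  have hmem_drop : ∀ b ∈ lst.drop p, x < b := by
    intro b hb
    obtain ⟨j, hm, rfl⟩ := List.mem_iff_getElem.mp hb
    rw [List.getElem_drop]
    exact hhi (p + j) (by simp at hm; omega) (by omega)
  refine List.pairwise_append.mpr ⟨h.take, ?_, ?_⟩
  · refine List.pairwise_cons.mpr ⟨fun b hb => le_of_lt (hmem_drop b hb), h.drop⟩
  · intro a ha b hb
    rcases List.mem_cons.mp hb with rfl | hb'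
    · exact hmem_take a ha
    · exact le_trans (hmem_take a ha) (le_of_lt (hmem_drop b hb'))

theorem insSorted_nil (x : Int) : insSorted [] x = [x] := by
  unfold insSorted
  rw [bisectLoop]
  simp

-- binary-search insertion into a sorted list IS Python's sorted() of the appended list
theorem insSorted_eq_sorted (lst : List Int) (x : Int) (h : lst.Pairwise (· ≤ ·)) :
    insSorted lst x = PySem.List.sorted (lst ++ [x]) (fun y => y) := by
  refine (PySem.List.sorted_id_eq_of_perm_of_pairwise (lst ++ [x]) (insSorted lst x) ?_ (insSorted_pairwise lst x h)).symm
  exact (insSorted_perm lst x).trans (List.perm_append_singleton x lst).symm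

theorem sorted_append_sorted (l : List Int) (x : Int) :
    PySem.List.sorted (PySem.List.sorted l (fun y => y) ++ [x]) (fun y => y)
      = PySem.List.sorted (l ++ [x]) (fun y => y) := by
  exact PySem.List.sorted_eq_sorted_of_perm _ _ _ (fun a b h => h)
    ((PySem.List.sorted_perm l (fun y => y) false).append_right [x])

-- the relation maintained between A's first-phase dict and B's dict
def RelAB (pmA pmB : PySem.Dict Int (List Int)) : Prop :=
  pmA.keys = pmB.keys ∧ pmA.keys.Nodup ∧
  ∀ k : Int, pmB.getD k [] = PySem.List.sorted (pmA.getD k []) (fun y => y)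

theorem relAB_step (pmA pmB : PySem.Dict Int (List Int)) (k i : Int) (h : RelAB pmA pmB) :
    RelAB (if pmA.contains i = false then pmA.insert i [k]
         else pmA.modify i [] (fun l => l ++ [k]))
        (pmB.insert i (insSorted (pmB.getD i []) k)) := by
  obtain ⟨hk, hnd, hv⟩ := h
  have hcb : pmB.contains i = pmA.contains i := by
    rcases hA : pmA.contains i with _ | _
    · have : ¬ i ∈ pmB.keys := by
        rw [← hk]; intro hm
        rw [(PySem.Dict.contains_iff_mem_keys pmA i).mpr hm] at hA; cases hA
      rcases hB : pmB.contains i with _ | _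
      · rfl
      · exact absurd ((PySem.Dict.contains_iff_mem_keys pmB i).mp hB) this
    · exact (PySem.Dict.contains_iff_mem_keys pmB i).mpr
        (hk ▸ (PySem.Dict.contains_iff_mem_keys pmA i).mp hA)
  by_cases hA : pmA.contains i = false
  · -- i is a new key in both dicts
    have hB : pmB.contains i = false := hcb.trans hA
    rw [if_pos hA]
    refine ⟨?_, ?_, ?_⟩
    · rw [PySem.Dict.keys_insert_of_not_contains pmA _ hA,
        PySem.Dict.keys_insert_of_not_contains pmB _ hB, hk]
    · rw [PySem.Dict.keys_insert_of_not_contains pmA _ hA]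
      refine List.Nodup.append hnd (List.nodup_singleton i) ?_
      intro a ha hb
      rw [List.mem_singleton] at hb; subst hb
      rw [(PySem.Dict.contains_iff_mem_keys pmA a).mpr ha] at hA; cases hA
    · intro j
      rw [PySem.Dict.getD_insert, PySem.Dict.getD_insert]
      by_cases hj : j = i
      · simp only [if_pos hj]
        rw [PySem.Dict.getD_of_not_contains pmB _ hB, insSorted_nil]
        exact (PySem.List.sorted_id_eq_of_perm_of_pairwise [k] [k] (List.Perm.refl _) (by simp)).symm
      · simp only [if_neg hj]; exact hv j
  · -- i already present in both dicts
    have hA' : pmA.contains i = true := by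
      rcases hc : pmA.contains i with _ | _
      · exact absurd hc hA
      · rfl
    have hB : pmB.contains i = true := hcb.trans hA'
    rw [if_neg hA]
    have hkeysA : (pmA.modify i [] (fun l => l ++ [k])).keys = pmA.keys := by
      rw [PySem.Dict.keys_modify, PySem.Dict.keys_insert_of_contains _ _ hA']
    refine ⟨?_, ?_, ?_⟩
    · rw [hkeysA, PySem.Dict.keys_insert_of_contains _ _ hB, hk]
    · rw [hkeysA]; exact hnd
    · intro j
      rw [PySem.Dict.getD_modify, PySem.Dict.getD_insert]
      by_cases hj : j = i
      · simp only [if_pos hj]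
        rw [hv i, insSorted_eq_sorted _ k (PySem.List.sorted_pairwise _ _),
          sorted_append_sorted]
      · simp only [if_neg hj]; exact hv j

theorem relAB_inner (v : List Int) (k : Int) (pmA pmB : PySem.Dict Int (List Int)) (h : RelAB pmA pmB) :
    RelAB (v.foldl (fun pm i =>
           if pm.contains i = false then pm.insert i [k]
           else pm.modify i [] (fun l => l ++ [k])) pmA)
        (v.foldl (fun pm i => pm.insert i (insSorted (pm.getD i []) k)) pmB) := by
  induction v generalizing pmA pmB with
  | nil => exact h
  | cons i t ih => exact ih _ _ (relAB_step pmA pmB k i h)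

theorem relAB_outer (items : List (Int × List Int)) (pmA pmB : PySem.Dict Int (List Int)) (h : RelAB pmA pmB) :
    RelAB (items.foldl (fun pm kv => kv.2.foldl (fun pm i =>
           if pm.contains i = false then pm.insert i [kv.1]
           else pm.modify i [] (fun l => l ++ [kv.1])) pm) pmA)
        (items.foldl (fun pm kv => kv.2.foldl (fun pm i =>
           pm.insert i (insSorted (pm.getD i []) kv.1)) pm) pmB) := by
  induction items generalizing pmA pmB with
  | nil => exact h
  | cons kv t ih => exact ih _ _ (relAB_inner kv.2 kv.1 pmA pmB h)

-- second phase of A: folding `modify … sort` over a list of present keys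
theorem phase2_fold (ks : List Int) (d : PySem.Dict Int (List Int))
    (hnd : ks.Nodup) (hin : ∀ k ∈ ks, d.contains k = true) :
    (ks.foldl (fun pm k => pm.modify k [] (fun l => PySem.List.sorted l (fun x => x))) d).keys = d.keys ∧
    ∀ j : Int, (ks.foldl (fun pm k => pm.modify k [] (fun l => PySem.List.sorted l (fun x => x))) d).getD j []
      = if j ∈ ks then PySem.List.sorted (d.getD j []) (fun y => y) else d.getD j [] := by
  induction ks generalizing d with
  | nil => simp
  | cons k t ih =>
    have hck : d.contains k = true := hin k (List.mem_cons_self ..)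
    have hkeys1 : (d.modify k [] (fun l => PySem.List.sorted l (fun x => x))).keys = d.keys := by
      rw [PySem.Dict.keys_modify, PySem.Dict.keys_insert_of_contains _ _ hck]
    have hin1 : ∀ j ∈ t, (d.modify k [] (fun l => PySem.List.sorted l (fun x => x))).contains j = true := by
      intro j hj
      rw [PySem.Dict.contains_modify]
      simp [hin j (List.mem_cons_of_mem _ hj)]
    obtain ⟨ihk, ihv⟩ := ih (d.modify k [] (fun l => PySem.List.sorted l (fun x => x))) hnd.of_cons hin1
    refine ⟨by rw [List.foldl_cons, ihk, hkeys1], ?_⟩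
    intro j
    rw [List.foldl_cons, ihv j, PySem.Dict.getD_modify]
    by_cases hjt : j ∈ t
    · have hjk : j ≠ k := fun h => (List.nodup_cons.mp hnd).1 (h ▸ hjt)
      simp [hjt, hjk, List.mem_cons]
    · by_cases hjk : j = k
      · simp [hjk]
      · simp [hjt, hjk, List.mem_cons]

-- ===== VERDICT (by name: the statement is the Claim_ definition above) =====
theorem get_preceding_from_succeding_spec : Claim_equal_get_preceding_from_succeding := by
  intro sm _
  show get_preceding_from_succeding sm = get_preceding_from_succeding_alt sm
  unfold get_preceding_from_succeding get_preceding_from_succeding_alt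
  set items := (PySem.Dict.ofList sm).items with hitems
  have h0 : RelAB (PySem.Dict.empty : PySem.Dict Int (List Int)) PySem.Dict.empty := by
    refine ⟨rfl, PySem.Dict.nodup_keys_empty, ?_⟩
    intro k
    rw [PySem.Dict.getD_empty]
    exact (PySem.List.sorted_id_eq_of_perm_of_pairwise [] [] (List.Perm.refl _) (by simp)).symm
  obtain ⟨hk, hnd, hv⟩ := relAB_outer items PySem.Dict.empty PySem.Dict.empty h0
  set pmA := items.foldl (fun pm kv => kv.2.foldl (fun pm i =>
      if pm.contains i = false then pm.insert i [kv.1]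
      else pm.modify i [] (fun l => l ++ [kv.1])) pm) PySem.Dict.empty with hpmA
  set pmB := items.foldl (fun pm kv => kv.2.foldl (fun pm i =>
      pm.insert i (insSorted (pm.getD i []) kv.1)) pm) PySem.Dict.empty with hpmB
  obtain ⟨h2k, h2v⟩ := phase2_fold pmA.keys pmA hnd
    (fun k hk' => (PySem.Dict.contains_iff_mem_keys pmA k).mpr hk')
  set pm2 := pmA.keys.foldl (fun pm k => pm.modify k [] (fun l => PySem.List.sorted l (fun x => x))) pmA
  have h2v' : ∀ j : Int, pm2.getD j [] = pmB.getD j [] := by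
    intro j
    rw [h2v j, hv j]
    by_cases hj : j ∈ pmA.keys
    · simp [hj]
    · have : pmA.contains j = false := by
        rcases hc : pmA.contains j with _ | _
        · rfl
        · exact absurd ((PySem.Dict.contains_iff_mem_keys pmA j).mp hc) hj
      rw [PySem.Dict.getD_of_not_contains pmA _ this]
      simp [hj]
      exact PySem.List.sorted_id_eq_of_perm_of_pairwise [] [] (List.Perm.refl _) (by simp)
  rw [PySem.Dict.items_eq_map_keys pm2 (h2k ▸ hnd) [],
      PySem.Dict.items_eq_map_keys pmB (hk ▸ hnd) []]
  rw [h2k, hk]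
  exact List.map_congr_left (fun j _ => by rw [h2v' j])
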